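-- pv_equiv track=rewrite | github.com/AakashOfficial/ReLecture | scripts/synchronize.py | strip_text
-- ===== SOURCE A (Python) =====
-- def strip_text(text):
-- 	delete_words = ['"',':',';','!','@','#','$','%','^','&','0','1','2','3','4','5','6','7','8','9',
-- 	                            '*','(',')','+','-','_','=','{','}','[',']','?',
-- 	                            '/','<','>',',','.','|','`','~','"',"'",'\\','\n']
-- 	text = text.replace("\n", " ")
-- 	text = text.replace("\r", " ")
--
-- 	for dw in delete_words:
-- 		text = text.replace(dw, "")
-- 	return text.lower()
-- ===== SOURCE B (Python) =====
-- def strip_text(text):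
--     deleted = set('":;!@#$%^&0123456789*()+-_={}[]?/<>,.|`~\'\\')
--     out = []
--     for c in text:
--         if c == '\n' or c == '\r':
--             out.append(' ')
--         elif c not in deleted:
--             out.append(c.lower())
--     return ''.join(out)
-- ===== Notes on version B (the rewrite author's own statement) =====
-- stated objective: alternative
-- what changed: Replaces A's 41 staged full-string replace passes with a single character-by-character pass using a precomputed delete set (newline/CR mapped to space, deleted characters skipped, the rest lowercased).
import Mathlib
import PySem

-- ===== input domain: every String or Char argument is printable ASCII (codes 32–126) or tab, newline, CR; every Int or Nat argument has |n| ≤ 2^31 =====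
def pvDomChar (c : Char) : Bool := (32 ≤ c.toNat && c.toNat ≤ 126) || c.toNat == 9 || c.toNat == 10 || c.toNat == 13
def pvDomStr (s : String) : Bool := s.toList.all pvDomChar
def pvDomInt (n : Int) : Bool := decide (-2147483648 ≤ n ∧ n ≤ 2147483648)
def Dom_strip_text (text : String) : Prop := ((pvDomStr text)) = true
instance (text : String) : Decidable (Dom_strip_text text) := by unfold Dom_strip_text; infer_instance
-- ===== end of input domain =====

-- B replaces A's 41 staged full-string replace passes with a single character pass over a
-- precomputed delete set; same return value, no speed claim.

-- ===== PORT A =====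
def stripTextDeleteWords : List String :=
  ["\"", ":", ";", "!", "@", "#", "$", "%", "^", "&", "0", "1", "2", "3", "4", "5", "6", "7", "8", "9",
   "*", "(", ")", "+", "-", "_", "=", "{", "}", "[", "]", "?",
   "/", "<", ">", ",", ".", "|", "`", "~", "\"", "'", "\\", "\n"]

def strip_text (text : String) : String :=
  let t1 := PySem.Str.replace text "\n" " "
  let t2 := PySem.Str.replace t1 "\r" " "
  let t3 := stripTextDeleteWords.foldl (fun t dw => PySem.Str.replace t dw "") t2
  PySem.Str.lower t3

-- ===== PORT B =====
def stripTextDeleteSet : PySem.Set Char :=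
  PySem.Set.ofList "\":;!@#$%^&0123456789*()+-_={}[]?/<>,.|`~'\\".toList

def stripAltF (c : Char) : Option Char :=
  if c = '\n' ∨ c = '\r' then some ' '
  else if stripTextDeleteSet.contains c then none
  else some (PySem.Chars.lowerChar c)

def strip_text_alt (text : String) : String :=
  String.ofList (text.toList.filterMap stripAltF)

-- ===== PRECONDITION & SPEC =====
def Spec_strip_text (text : String) (out : String) : Prop := out = strip_text_alt text
instance (text : String) (out : String) : Decidable (Spec_strip_text text out) := by unfold Spec_strip_text; infer_instance

-- ===== CLAIM (what is proved, stated in full; the proofs are below) =====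
def Claim_equal_strip_text : Prop := ∀ (text : String), Dom_strip_text text → Spec_strip_text text (strip_text text)

-- ===== LEMMAS AND PROOFS =====

-- A's delete characters, as characters, in A's order.
def stripDeleteChars : List Char :=
  ['"', ':', ';', '!', '@', '#', '$', '%', '^', '&', '0', '1', '2', '3', '4', '5', '6', '7', '8', '9',
   '*', '(', ')', '+', '-', '_', '=', '{', '}', '[', ']', '?',
   '/', '<', '>', ',', '.', '|', '`', '~', '"', '\'', '\\', '\n']

lemma replace_go_single (a : Char) (new : List Char) (fuel : Nat) (l acc : List Char)
    (h : l.length ≤ fuel) :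
    PySem.Chars.replace.go [a] new fuel l acc
      = acc.reverse ++ l.flatMap (fun c => if c = a then new else [c]) := by
  induction fuel generalizing l acc with
  | zero =>
    have : l = [] := List.eq_nil_of_length_eq_zero (Nat.le_zero.mp h)
    subst this; simp [PySem.Chars.replace.go]
  | succ fuel ih =>
    cases l with
    | nil => simp [PySem.Chars.replace.go]
    | cons c t =>
      simp only [PySem.Chars.replace.go, List.isPrefixOf]
      by_cases hc : a = c
      · subst hc
        simp only [beq_self_eq_true, Bool.true_and, if_true]
        rw [ih _ _ (by simpa using Nat.le_of_succ_le_succ h)]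
        simp
      · have hne : (a == c) = false := beq_eq_false_iff_ne.mpr hc
        rw [if_neg (by simp [hne])]
        rw [ih _ _ (by simpa using Nat.le_of_succ_le_succ h)]
        have hcc : c ≠ a := fun h' => hc h'.symm
        simp [hcc]

lemma replace_single (cs : List Char) (a : Char) (new : List Char) :
    PySem.Chars.replace cs [a] new = cs.flatMap (fun c => if c = a then new else [c]) := by
  unfold PySem.Chars.replace
  rw [if_neg (by simp)]
  simpa using replace_go_single a new cs.length cs [] le_rfl

lemma replace_single_nil (cs : List Char) (a : Char) :
    PySem.Chars.replace cs [a] [] = cs.filter (fun c => !(c == a)) := by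
  rw [replace_single]
  induction cs with
  | nil => rfl
  | cons c t ih =>
    by_cases h : c = a <;> simp [h, ih]

lemma delete_fold (ds : List Char) (cs : List Char) :
    (ds.map (fun a => [a])).foldl (fun t w => PySem.Chars.replace t w []) cs
      = cs.filter (fun c => !ds.contains c) := by
  induction ds generalizing cs with
  | nil => simp
  | cons a ds ih =>
    simp only [List.map_cons, List.foldl_cons]
    rw [replace_single_nil, ih, List.filter_filter]
    apply List.filter_congr
    intro c _
    by_cases h : c = a <;> simp [h]

lemma foldl_str_replace_empty (ds : List String) (t : String) :
    (ds.foldl (fun t dw => PySem.Str.replace t dw "") t).toList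
      = (ds.map String.toList).foldl (fun cs dw => PySem.Chars.replace cs dw []) t.toList := by
  induction ds generalizing t with
  | nil => rfl
  | cons d ds ih => simp [ih, PySem.Str.toList_replace]

-- the character-level pipeline equality, one induction over the characters
def stripAltChars : List Char :=
  ['"', ':', ';', '!', '@', '#', '$', '%', '^', '&', '0', '1', '2', '3', '4', '5', '6', '7', '8', '9',
   '*', '(', ')', '+', '-', '_', '=', '{', '}', '[', ']', '?',
   '/', '<', '>', ',', '.', '|', '`', '~', '\'', '\\']

set_option maxRecDepth 4096 in
lemma stripSet_eq : (stripTextDeleteSet : List Char) = stripAltChars := by decide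

set_option maxRecDepth 4096 in
lemma pipeline_eq (cs : List Char) :
    ((((cs.map (fun c => if c = '\n' then ' ' else c)).map
        (fun c => if c = '\r' then ' ' else c)).filter
        (fun c => !stripDeleteChars.contains c)).map PySem.Chars.lowerChar)
      = cs.filterMap stripAltF := by
  induction cs with
  | nil => rfl
  | cons c t ih =>
    simp only [List.map_cons]
    by_cases h1 : c = '\n'
    · subst h1
      have hfc : stripAltF '\n' = some ' ' := by decide
      rw [List.filterMap_cons_some hfc,
          show (if ('\n' : Char) = '\n' then ' ' else '\n') = ' ' by decide,
          show (if (' ' : Char) = '\r' then ' ' else ' ') = ' ' by decide,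
          List.filter_cons_of_pos (by decide), List.map_cons,
          show PySem.Chars.lowerChar ' ' = ' ' by decide, ih]
    · by_cases h2 : c = '\r'
      · subst h2
        have hfc : stripAltF '\r' = some ' ' := by decide
        rw [List.filterMap_cons_some hfc,
            show (if ('\r' : Char) = '\n' then ' ' else '\r') = '\r' by decide,
            show (if ('\r' : Char) = '\r' then ' ' else '\r') = ' ' by decide,
            List.filter_cons_of_pos (by decide), List.map_cons,
            show PySem.Chars.lowerChar ' ' = ' ' by decide, ih]
      · rw [if_neg h1, if_neg h2]
        -- (the two map-ifs are now reduced; handle filterMap via stripAltF facts)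
        by_cases hc : c ∈ stripDeleteChars
        · have hsub2 : stripDeleteChars.all
              (fun x => x == '\n' || stripAltChars.contains x) = true := by rfl
          have hb : stripTextDeleteSet.contains c = true := by
            have h := List.all_eq_true.mp hsub2 c hc
            simp only [Bool.or_eq_true, beq_iff_eq, List.contains_iff_mem] at h
            rcases h with h | h
            · exact absurd h h1
            · have hm : c ∈ (stripTextDeleteSet : List Char) := by rw [stripSet_eq]; exact h
              simpa using hm
          rw [List.filter_cons_of_neg (by simpa using hc),
              List.filterMap_cons_none
                (by unfold stripAltF; rw [if_neg (by simp [h1, h2]), if_pos hb])]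
          exact ih
        · have hsub' : stripAltChars.all (fun x => stripDeleteChars.contains x) = true := by rfl
          have hsub : stripAltChars ⊆ stripDeleteChars := fun x hx => by
            simpa using List.all_eq_true.mp hsub' x hx
          have hb : stripTextDeleteSet.contains c = false := by
            cases hcb : stripTextDeleteSet.contains c with
            | false => rfl
            | true =>
              exact absurd (hsub (by rw [← stripSet_eq]; simpa using hcb)) hc
          rw [List.filter_cons_of_pos (by simpa using hc), List.map_cons,
              List.filterMap_cons_some
                (show stripAltF c = some (PySem.Chars.lowerChar c) by
                  unfold stripAltF
                  rw [if_neg (by simp [h1, h2]), if_neg (by simpa using hb)]), ih]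

lemma replace_single_map (cs : List Char) (a b : Char) :
    PySem.Chars.replace cs [a] [b] = cs.map (fun c => if c = a then b else c) := by
  rw [replace_single]
  induction cs with
  | nil => rfl
  | cons c t ih => by_cases h : c = a <;> simp [h, ih]

-- ===== VERDICT (by name: the statement is the Claim_ definition above) =====
theorem strip_text_spec : Claim_equal_strip_text := by
  intro text _
  unfold Spec_strip_text strip_text strip_text_alt
  have key : (strip_text text).toList = (strip_text_alt text).toList := by
    unfold strip_text strip_text_alt
    simp only [PySem.Str.toList_lower, PySem.Chars.lower]
    rw [foldl_str_replace_empty]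
    have hmap : (stripTextDeleteWords.map String.toList)
        = stripDeleteChars.map (fun a => [a]) := by decide
    rw [hmap, delete_fold]
    simp only [PySem.Str.toList_replace]
    have h1 : ("\n" : String).toList = ['\n'] := by decide
    have h2 : (" " : String).toList = [' '] := by decide
    have h3 : ("\r" : String).toList = ['\r'] := by decide
    rw [h1, h2, h3, replace_single_map, replace_single_map]
    have := pipeline_eq text.toList
    simpa using this
  exact String.toList_inj.mp key
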